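-- pv_equiv track=rewrite | github.com/takingtheback/Algorithm-study | Algorithm-python/test1_4.py | solution
-- ===== SOURCE A (Python) =====
-- def solution(price, cost):
--     arr = []
--     for i in range(len(price)):
--         if (price[i] - cost[i] > 0):
--             arr.append((price[i], cost[i]))
--     arr = sorted(arr, key=lambda arr: arr[0])
--
--     maxProfit = 0
--     maxProfitPrice = 0
--
--     for i in range(len(arr)):
--         salePrice = arr[i][0]
--         sum = 0
--
--         for x in arr[i:]:
--             if salePrice - x[1] <= 0:
--                 continue
--             sum += (salePrice - x[1])
--
--         if sum > maxProfit:
--             maxProfit = sum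
--             maxProfitPrice = salePrice
--
--     return maxProfitPrice
-- ===== SOURCE B (Python) =====
-- def solution(price, cost):
--     # Backward pass over the price-sorted profitable items, maintaining the
--     # suffix's costs as an incrementally built sorted list; each candidate's
--     # profit is p*count - sum over the costs below p (early break on the
--     # sorted list), and ">=" while scanning backward keeps the earliest
--     # maximiser, matching A's first-strict-max forward scan.
--     items = sorted([(price[i], cost[i]) for i in range(len(price))
--                     if price[i] > cost[i]],
--                    key=lambda t: t[0])
--     best_profit = 0
--     best_price = 0
--     suffix_costs = []  # sorted ascending: costs of the suffix processed so far
--     for p, c in reversed(items):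
--         # insert c keeping suffix_costs sorted
--         k = 0
--         while k < len(suffix_costs) and suffix_costs[k] < c:
--             k += 1
--         suffix_costs.insert(k, c)
--         cnt = 0
--         s = 0
--         for x in suffix_costs:
--             if x >= p:
--                 break
--             cnt += 1
--             s += x
--         profit = p * cnt - s
--         if profit >= best_profit:
--             best_profit = profit
--             best_price = p
--     return best_price
-- ===== Notes on version B (the rewrite author's own statement) =====
-- stated objective: alternative
-- what changed: A rescans the whole sorted suffix for every candidate price; B makes one backward pass that maintains the suffix's costs as an incrementally built sorted list and reads each candidate's profit as p*count - sum of the costs below p with an early break, keeping the earliest maximiser via >= while scanning backward.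
import Mathlib
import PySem

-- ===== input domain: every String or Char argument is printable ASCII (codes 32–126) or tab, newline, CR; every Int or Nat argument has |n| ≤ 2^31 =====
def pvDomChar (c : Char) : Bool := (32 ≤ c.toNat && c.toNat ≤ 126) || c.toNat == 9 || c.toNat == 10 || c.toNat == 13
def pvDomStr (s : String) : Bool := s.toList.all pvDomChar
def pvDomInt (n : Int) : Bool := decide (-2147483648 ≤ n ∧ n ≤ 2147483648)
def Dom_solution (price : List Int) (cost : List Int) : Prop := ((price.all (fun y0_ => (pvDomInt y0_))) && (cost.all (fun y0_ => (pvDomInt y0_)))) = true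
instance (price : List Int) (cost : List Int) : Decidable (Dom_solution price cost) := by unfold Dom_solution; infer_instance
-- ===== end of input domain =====

-- B replaces A's per-candidate rescans of the sorted suffix by one backward pass that
-- maintains the suffix's costs as an incrementally built sorted list (profit = p*cnt - s
-- with an early break); objective: alternative structure, not claimed faster.

-- ===== PORT A =====
-- loop body of A's build loop: 'if price[i] - cost[i] > 0: arr.append(...)'
def buildStep (price cost : List Int) (acc : List (Int × Int)) (i : Nat) : List (Int × Int) :=
  match PySem.List.pyGet? price (i : Int), PySem.List.pyGet? cost (i : Int) with
  | some p, some c => if p - c > 0 then acc ++ [(p, c)] else acc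
  | _, _ => acc  -- cost[i] IndexError in Python (cost shorter than price); excluded by Pre_solution

-- loop body of A's outer loop (index i, state (maxProfit, maxProfitPrice))
def outerStep (arr : List (Int × Int)) (st : Int × Int) (i : Nat) : Int × Int :=
  let salePrice := (PySem.List.pyGetD arr (i : Int) (0, 0)).1   -- i < len(arr): always in range
  let sum := (PySem.List.slice arr (some (i : Int)) none).foldl
      (fun s x => if salePrice - x.2 ≤ 0 then s else s + (salePrice - x.2)) 0
  if sum > st.1 then (sum, salePrice) else st

def solution (price : List Int) (cost : List Int) : Int :=
  let arr := (List.range price.length).foldl (buildStep price cost) []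
  let arr := PySem.List.sorted arr (fun t => t.1)
  ((List.range arr.length).foldl (outerStep arr) (0, 0)).2

-- ===== PORT B =====
-- Source B's list comprehension over range(len(price)): '(price[i], cost[i]) ... if price[i] > cost[i]'
def altBuildStep (price cost : List Int) (acc : List (Int × Int)) (i : Nat) : List (Int × Int) :=
  match PySem.List.pyGet? price (i : Int), PySem.List.pyGet? cost (i : Int) with
  | some p, some c => if c < p then acc ++ [(p, c)] else acc
  | _, _ => acc  -- cost[i] IndexError in Python (cost shorter than price); excluded by Pre_solution

-- insert c into the ascending list cs, keeping it sorted (Source B's while+insert)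
def insertSorted (c : Int) : List Int → List Int
  | [] => [c]
  | x :: xs => if x < c then x :: insertSorted c xs else c :: x :: xs

-- scan the sorted cost list, counting and summing the entries below p (early break)
def scanBelow (p cnt s : Int) : List Int → Int × Int
  | [] => (cnt, s)
  | x :: xs => if x ≥ p then (cnt, s) else scanBelow p (cnt + 1) (s + x) xs

-- loop body of B's backward pass: state (best_profit, best_price, suffix_costs)
def altStep (st : Int × Int × List Int) (t : Int × Int) : Int × Int × List Int :=
  let suffix := insertSorted t.2 st.2.2
  let pr := scanBelow t.1 0 0 suffix
  let profit := t.1 * pr.1 - pr.2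
  if profit ≥ st.1 then (profit, t.1, suffix) else (st.1, st.2.1, suffix)

def solution_alt (price : List Int) (cost : List Int) : Int :=
  let items := PySem.List.sorted
      ((List.range price.length).foldl (altBuildStep price cost) []) (fun t => t.1)
  (items.reverse.foldl altStep (0, 0, [])).2.1

-- ===== PRECONDITION & SPEC =====
-- Both programs read cost[i] for every i below len(price): they raise IndexError when cost is shorter.
def Pre_solution (price : List Int) (cost : List Int) : Prop := price.length ≤ cost.length
instance (price : List Int) (cost : List Int) : Decidable (Pre_solution price cost) := by
  unfold Pre_solution; infer_instance
def pvWitness_solution : List Int × List Int := ([10, 5, 7], [3, 9, 2])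

def Spec_solution (price : List Int) (cost : List Int) (out : Int) : Prop := out = solution_alt price cost
instance (price : List Int) (cost : List Int) (out : Int) : Decidable (Spec_solution price cost out) := by
  unfold Spec_solution; infer_instance

-- ===== CLAIM (what is proved, stated in full; the proofs are below) =====
def Claim_equal_solution : Prop := ∀ (price : List Int) (cost : List Int), Dom_solution price cost → Pre_solution price cost → Spec_solution price cost (solution price cost)

-- ===== LEMMAS AND PROOFS =====

-- total profit at sale price p over a multiset of costs
def gProfit (p : Int) (cs : List Int) : Int := (cs.map (fun c => max 0 (p - c))).sum

-- profit/price pairs of every suffix of the item list, front to back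
def vsOf : List (Int × Int) → List (Int × Int)
  | [] => []
  | x :: l => (gProfit x.1 ((x :: l).map Prod.snd), x.1) :: vsOf l

def gtStep (st v : Int × Int) : Int × Int := if v.1 > st.1 then v else st

-- first maximiser, ties to the front, empty ↦ (0,0)
def selM : List (Int × Int) → Int × Int
  | [] => (0, 0)
  | x :: l => if (selM l).1 > x.1 then selM l else x

theorem foldl_gtStep (l : List (Int × Int)) (init : Int × Int) (h0 : 0 ≤ init.1) :
    l.foldl gtStep init = if (selM l).1 > init.1 then selM l else init := by
  induction l generalizing init with
  | nil => simp only [List.foldl_nil, selM]; rw [if_neg (by omega)]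
  | cons x l ih =>
    rw [List.foldl_cons]
    have h0' : 0 ≤ (gtStep init x).1 := by simp only [gtStep]; split_ifs <;> omega
    rw [ih _ h0']
    simp only [selM, gtStep]
    split_ifs <;> first | rfl | omega

theorem selM_pos (l : List (Int × Int)) (hp : ∀ v ∈ l, 0 < v.1) (h : l ≠ []) :
    0 < (selM l).1 := by
  induction l with
  | nil => simp at h
  | cons x l ih =>
    have hx : 0 < x.1 := hp x (by simp)
    simp only [selM]
    by_cases hl : l = []
    · subst hl; simp only [selM]; rw [if_neg (by omega)]; exact hx
    · have := ih (fun v hv => hp v (List.mem_cons_of_mem _ hv)) hl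
      split_ifs <;> omega

theorem gProfit_nonneg (p : Int) (cs : List Int) : 0 ≤ gProfit p cs := by
  induction cs with
  | nil => simp [gProfit]
  | cons c cs ih => simp only [gProfit, List.map_cons, List.sum_cons] at *; omega

theorem gProfit_zero (p : Int) (cs : List Int) (h : ∀ c ∈ cs, p ≤ c) : gProfit p cs = 0 := by
  induction cs with
  | nil => simp [gProfit]
  | cons c cs ih =>
    have hc := h c (by simp)
    simp only [gProfit, List.map_cons, List.sum_cons]
    rw [show (cs.map (fun c => max 0 (p - c))).sum = gProfit p cs from rfl,
      ih (fun d hd => h d (List.mem_cons_of_mem _ hd))]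
    omega

theorem gProfit_perm (p : Int) {cs cs' : List Int} (h : cs.Perm cs') :
    gProfit p cs = gProfit p cs' := by
  exact List.Perm.sum_eq (h.map _)

theorem vsOf_pos (l : List (Int × Int)) (h : ∀ x ∈ l, x.2 < x.1) :
    ∀ v ∈ vsOf l, 0 < v.1 := by
  induction l with
  | nil => simp [vsOf]
  | cons x l ih =>
    intro v hv
    simp only [vsOf, List.mem_cons] at hv
    rcases hv with rfl | hv
    · have hx := h x (by simp)
      have := gProfit_nonneg x.1 (l.map Prod.snd)
      simp only [List.map_cons, gProfit, List.sum_cons]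
      simp only [gProfit] at this
      omega
    · exact ih (fun y hy => h y (List.mem_cons_of_mem _ hy)) v hv

-- inner-sum of A equals gProfit over the suffix's costs
theorem sumA_eq (p : Int) (l : List (Int × Int)) (s : Int) :
    l.foldl (fun s x => if p - x.2 ≤ 0 then s else s + (p - x.2)) s
      = s + gProfit p (l.map Prod.snd) := by
  induction l generalizing s with
  | nil => simp [gProfit]
  | cons x l ih =>
    simp only [List.foldl_cons, ih, List.map_cons, gProfit, List.sum_cons]
    split_ifs <;> simp <;> omega

theorem insertSorted_perm (c : Int) (cs : List Int) : (insertSorted c cs).Perm (c :: cs) := by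
  induction cs with
  | nil => simp [insertSorted]
  | cons x xs ih =>
    simp only [insertSorted]
    split_ifs
    · exact ((ih.cons x).trans (List.Perm.swap c x xs))
    · rfl

theorem insertSorted_sorted (c : Int) (cs : List Int) (h : cs.Pairwise (· ≤ ·)) :
    (insertSorted c cs).Pairwise (· ≤ ·) := by
  induction cs with
  | nil => simp [insertSorted]
  | cons x xs ih =>
    rcases List.pairwise_cons.mp h with ⟨hx, hxs⟩
    simp only [insertSorted]
    split_ifs with hlt
    · refine List.pairwise_cons.mpr ⟨?_, ih hxs⟩
      intro y hy
      have hy' : y ∈ c :: xs := (insertSorted_perm c xs).mem_iff.mp hy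
      rcases List.mem_cons.mp hy' with rfl | hy'
      · omega
      · exact hx y hy'
    · refine List.pairwise_cons.mpr ⟨?_, List.pairwise_cons.mpr ⟨hx, hxs⟩⟩
      intro y hy
      rcases List.mem_cons.mp hy with rfl | hy'
      · omega
      · have := hx y hy'; omega

theorem scanBelow_eq (p : Int) (cs : List Int) (h : cs.Pairwise (· ≤ ·)) (cnt s : Int) :
    p * (scanBelow p cnt s cs).1 - (scanBelow p cnt s cs).2 = p * cnt - s + gProfit p cs := by
  induction cs generalizing cnt s with
  | nil => simp [scanBelow, gProfit]
  | cons x xs ih =>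
    rcases List.pairwise_cons.mp h with ⟨hx, hxs⟩
    simp only [scanBelow]
    split_ifs with hge
    · rw [gProfit_zero p (x :: xs) ?_]
      · ring
      · intro d hd
        rcases List.mem_cons.mp hd with rfl | hd
        · omega
        · exact le_trans hge (hx d hd)
    · rw [ih hxs]
      simp only [gProfit, List.map_cons, List.sum_cons]
      have hmax : max 0 (p - x) = p - x := by omega
      rw [hmax]; ring

-- the B-side selection step matches the structural first-maximiser
theorem geStep_selM (l : List (Int × Int)) (v : Int × Int) :
    (if v.1 ≥ (selM l).1 then v else selM l) = selM (v :: l) := by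
  simp only [selM]; split_ifs <;> first | rfl | omega

-- invariant of B's backward pass
theorem altFold_inv (l : List (Int × Int)) :
    ((l.reverse.foldl altStep (0, 0, [])).2.2).Perm (l.map Prod.snd) ∧
    ((l.reverse.foldl altStep (0, 0, [])).2.2).Pairwise (· ≤ ·) ∧
    ((l.reverse.foldl altStep (0, 0, [])).1, (l.reverse.foldl altStep (0, 0, [])).2.1) = selM (vsOf l) := by
  induction l with
  | nil => simp [selM, vsOf]
  | cons x l ih =>
    obtain ⟨hperm, hsorted, hsel⟩ := ih
    rw [List.reverse_cons, List.foldl_append]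
    set r := l.reverse.foldl altStep (0, 0, []) with hr
    simp only [List.foldl_cons, List.foldl_nil]
    have hsufperm : (insertSorted x.2 r.2.2).Perm ((x :: l).map Prod.snd) := by
      simpa using (insertSorted_perm x.2 r.2.2).trans (hperm.cons x.2)
    have hsufsorted : (insertSorted x.2 r.2.2).Pairwise (· ≤ ·) := insertSorted_sorted _ _ hsorted
    have hprof : x.1 * (scanBelow x.1 0 0 (insertSorted x.2 r.2.2)).1
        - (scanBelow x.1 0 0 (insertSorted x.2 r.2.2)).2
        = gProfit x.1 ((x :: l).map Prod.snd) := by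
      rw [scanBelow_eq _ _ hsufsorted, gProfit_perm _ hsufperm]; ring
    refine ⟨?_, ?_, ?_⟩
    · simp only [altStep]; split_ifs <;> simpa using hsufperm
    · simp only [altStep]; split_ifs <;> simpa using hsufsorted
    · simp only [altStep]
      have h1 : r.1 = (selM (vsOf l)).1 := by rw [← hsel]
      have h2 : r.2.1 = (selM (vsOf l)).2 := by rw [← hsel]
      have hg := geStep_selM (vsOf l) (gProfit x.1 ((x :: l).map Prod.snd), x.1)
      simp only at hg
      rw [hprof, h1, h2,
        show vsOf (x :: l) = (gProfit x.1 ((x :: l).map Prod.snd), x.1) :: vsOf l from rfl,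
        ← hg]
      split_ifs <;> simp

-- A's outer index loop is the gtStep fold over the structural profit list
theorem outer_fold_eq (l : List (Int × Int)) (init : Int × Int) :
    (List.range l.length).foldl (outerStep l) init = (vsOf l).foldl gtStep init := by
  induction l generalizing init with
  | nil => simp [vsOf]
  | cons x l ih =>
    rw [List.length_cons, List.range_succ_eq_map, List.foldl_cons, List.foldl_map]
    have hstep : ∀ (st : Int × Int) (i : Nat), outerStep (x :: l) st (i + 1) = outerStep l st i := by
      intro st i
      simp only [outerStep]
      have hg : PySem.List.pyGetD (x :: l) ((i + 1 : Nat) : Int) (0, 0)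
          = PySem.List.pyGetD l (i : Int) (0, 0) := by
        rw [PySem.List.pyGetD_natCast, PySem.List.pyGetD_natCast]
        simp [List.getD]
      have hs : PySem.List.slice (x :: l) (some ((i + 1 : Nat) : Int)) none
          = PySem.List.slice l (some ((i : Nat) : Int)) none := by
        rw [PySem.List.slice_from_natCast, PySem.List.slice_from_natCast]
        simp [List.drop_succ_cons]
      rw [hg, hs]
    have hzero : outerStep (x :: l) init 0 = gtStep init (gProfit x.1 ((x :: l).map Prod.snd), x.1) := by
      simp only [outerStep, gtStep]
      rw [PySem.List.slice_from_natCast, PySem.List.pyGetD_natCast]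
      simp only [List.drop_zero, List.getD, List.getElem?_cons_zero, Option.getD_some]
      rw [sumA_eq]
      simp
    rw [show (fun st i => outerStep (x :: l) st (i + 1)) = outerStep l from by
      funext st i; exact hstep st i]
    rw [hzero, ih]
    simp [vsOf]

-- A's build loop produces the filtered zip (under Pre_)
theorem build_eq (price cost : List Int) (h : price.length ≤ cost.length)
    (acc : List (Int × Int)) :
    (List.range price.length).foldl (buildStep price cost) acc
      = acc ++ (price.zip cost).filter (fun t => decide (t.2 < t.1)) := by
  induction price generalizing cost acc with
  | nil => simp
  | cons p ps ih =>
    match cost with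
    | [] => simp at h
    | c :: cs =>
      rw [List.length_cons, List.range_succ_eq_map, List.foldl_cons, List.foldl_map]
      have hstep : ∀ (a : List (Int × Int)) (i : Nat),
          buildStep (p :: ps) (c :: cs) a (i + 1) = buildStep ps cs a i := by
        intro a i
        simp only [buildStep]
        rw [show ((i + 1 : Nat) : Int) = (i : Int) + 1 by push_cast; ring,
          PySem.List.pyGet?_cons_succ, PySem.List.pyGet?_cons_succ]
      have hzero : buildStep (p :: ps) (c :: cs) acc 0
          = if p - c > 0 then acc ++ [(p, c)] else acc := by
        simp only [buildStep]
        rw [show ((0 : Nat) : Int) = (0 : Int) by norm_num,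
          PySem.List.pyGet?_zero_cons, PySem.List.pyGet?_zero_cons]
      rw [show (fun a i => buildStep (p :: ps) (c :: cs) a (i + 1)) = buildStep ps cs from by
        funext a i; exact hstep a i]
      rw [hzero, ih cs (by simpa using h)]
      by_cases hpc : p - c > 0
      · simp [show c < p by omega, List.append_assoc]
      · simp [show ¬ (c < p) by omega]

-- B's comprehension over range(len(price)) produces the same filtered zip (under Pre_)
theorem altBuild_eq (price cost : List Int) (h : price.length ≤ cost.length)
    (acc : List (Int × Int)) :
    (List.range price.length).foldl (altBuildStep price cost) acc
      = acc ++ (price.zip cost).filter (fun t => decide (t.2 < t.1)) := by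
  induction price generalizing cost acc with
  | nil => simp
  | cons p ps ih =>
    match cost with
    | [] => simp at h
    | c :: cs =>
      rw [List.length_cons, List.range_succ_eq_map, List.foldl_cons, List.foldl_map]
      have hstep : ∀ (a : List (Int × Int)) (i : Nat),
          altBuildStep (p :: ps) (c :: cs) a (i + 1) = altBuildStep ps cs a i := by
        intro a i
        simp only [altBuildStep]
        rw [show ((i + 1 : Nat) : Int) = (i : Int) + 1 by push_cast; ring,
          PySem.List.pyGet?_cons_succ, PySem.List.pyGet?_cons_succ]
      have hzero : altBuildStep (p :: ps) (c :: cs) acc 0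
          = if c < p then acc ++ [(p, c)] else acc := by
        simp only [altBuildStep]
        rw [show ((0 : Nat) : Int) = (0 : Int) by norm_num,
          PySem.List.pyGet?_zero_cons, PySem.List.pyGet?_zero_cons]
      rw [show (fun a i => altBuildStep (p :: ps) (c :: cs) a (i + 1)) = altBuildStep ps cs from by
        funext a i; exact hstep a i]
      rw [hzero, ih cs (by simpa using h)]
      by_cases hpc : c < p
      · simp [hpc, List.append_assoc]
      · simp [hpc]

-- ===== VERDICT (by name: the statement is the Claim_ definition above) =====
theorem solution_spec : Claim_equal_solution := by
  intro price cost _hdom hpre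
  unfold Spec_solution solution solution_alt
  rw [build_eq price cost hpre [], altBuild_eq price cost hpre []]
  simp only [List.nil_append]
  set items := PySem.List.sorted ((price.zip cost).filter (fun t => decide (t.2 < t.1))) (fun t => t.1) with hitems
  obtain ⟨_, _, hsel⟩ := altFold_inv items
  rw [outer_fold_eq items (0, 0), foldl_gtStep _ _ (by norm_num)]
  have hpos : ∀ x ∈ items, x.2 < x.1 := by
    intro x hx
    rw [hitems, PySem.List.mem_sorted] at hx
    have := List.of_mem_filter hx
    simpa using this
  have hsnd : (items.reverse.foldl altStep (0, 0, [])).2.1 = (selM (vsOf items)).2 :=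
    congrArg Prod.snd hsel
  by_cases hnil : vsOf items = []
  · rw [hsnd, hnil]; simp [selM]
  · rw [if_pos (by simpa using selM_pos _ (vsOf_pos items hpos) hnil), hsnd]
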